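-- pv_equiv track=rewrite | github.com/SanjayVardhan/pwn | Origin/CTFs/angstromctf2022/caniride/exp.py | break_addr
-- ===== SOURCE A (Python) =====
-- def break_addr(address):
--     shorts = []
--     curr = 0
--     for _ in range(4):
--         num = address % 0x10000
--         desired_value = (num - curr + 0x10000) % 0x10000
--         shorts.append(desired_value)
--         curr = (curr + desired_value) % 0x10000
--         address = address >> 16
--     return shorts
-- ===== SOURCE B (Python) =====
-- def break_addr(address):
--     # Closed form: no loop, no chunk list, no running accumulator.
--     # Entry i is (chunk_i - chunk_{i-1}) mod 2^16, and since the chunks are the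
--     # shifted address reduced mod 2^16, the reduction can be folded into the
--     # final % so each delta is a single expression in the shifted addresses.
--     M = 1 << 16
--     return [address % M,
--             ((address >> 16) - address) % M,
--             ((address >> 32) - (address >> 16)) % M,
--             ((address >> 48) - (address >> 32)) % M]
-- ===== Notes on version B (the rewrite author's own statement) =====
-- stated objective: simpler
-- what changed: Replaces A's stateful 4-iteration loop (running value curr, append, shift in place) by a loop-free closed form: the returned list is written directly as four modular differences of shifted copies of the address, with no chunk list and no accumulator.
import Mathlib
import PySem

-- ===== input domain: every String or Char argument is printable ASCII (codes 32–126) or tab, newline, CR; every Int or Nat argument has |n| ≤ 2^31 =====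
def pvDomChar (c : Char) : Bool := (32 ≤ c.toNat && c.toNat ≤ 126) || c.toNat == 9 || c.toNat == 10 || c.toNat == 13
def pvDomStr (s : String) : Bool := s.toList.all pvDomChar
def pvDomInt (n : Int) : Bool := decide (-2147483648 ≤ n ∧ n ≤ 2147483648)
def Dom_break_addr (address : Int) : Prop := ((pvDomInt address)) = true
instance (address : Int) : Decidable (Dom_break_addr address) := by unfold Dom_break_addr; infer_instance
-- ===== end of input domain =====

-- B replaces A's stateful 4-iteration loop by a loop-free closed form (four modular
-- differences of shifted copies of the address); objective: simpler. Equal on all inputs.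

-- ===== PORT A =====
-- one loop iteration: state = (shorts, curr, address)
def break_addr_step (st : List Int × Int × Int) : List Int × Int × Int :=
  let num := st.2.2 % 65536                   -- address % 0x10000 (Python % with positive modulus = emod)
  let desired_value := (num - st.2.1 + 65536) % 65536
  (st.1 ++ [desired_value], (st.2.1 + desired_value) % 65536, st.2.2 >>> (16:Nat))  -- Python >> = Int >>>

def break_addr (address : Int) : List Int :=
  ((List.range 4).foldl (fun st _ => break_addr_step st) ([], 0, address)).1

-- ===== PORT B =====
def break_addr_alt (address : Int) : List Int :=
  [address % 65536,
   ((address >>> (16:Nat)) - address) % 65536,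
   ((address >>> (32:Nat)) - (address >>> (16:Nat))) % 65536,
   ((address >>> (48:Nat)) - (address >>> (32:Nat))) % 65536]

-- ===== PRECONDITION & SPEC =====
def Spec_break_addr (address : Int) (out : List Int) : Prop := out = break_addr_alt address
instance (address : Int) (out : List Int) : Decidable (Spec_break_addr address out) := by unfold Spec_break_addr; infer_instance

-- ===== CLAIM (what is proved, stated in full; the proofs are below) =====
def Claim_equal_break_addr : Prop := ∀ (address : Int), Dom_break_addr address → Spec_break_addr address (break_addr address)

-- ===== LEMMAS AND PROOFS =====
theorem shiftR_k (a : Int) (k : Nat) : a >>> k = a / 2 ^ k := by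
  rw [Int.shiftRight_eq_div_pow]; push_cast; ring_nf

-- ===== VERDICT (by name: the statement is the Claim_ definition above) =====
theorem break_addr_spec : Claim_equal_break_addr := by
  intro address _
  unfold Spec_break_addr break_addr break_addr_alt break_addr_step
  simp [List.range_succ, shiftR_k]
  omega
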